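-- pv_equiv track=rewrite | github.com/goldenInteger/Test2 | mahjong_ai/core/scoring.py | remove_sets
-- ===== SOURCE A (Python) =====
-- from collections import Counter
--
-- def remove_sets(counts: Counter) -> bool:
--     """
--     從牌堆中嘗試遞迴移除所有刻子或順子。
--     嘗試所有可能拆法（DFS），若能剝光則回傳 True。
--     """
--     # Base case：已經沒東西了，代表成功組完
--     if sum(counts.values()) == 0:
--         return True
--
--     # 對每一種 tile 嘗試
--     for tile in sorted(counts):
--         if counts[tile] == 0:
--             continue
--
--         # 嘗試刻子
--         if counts[tile] >= 3:
--             new_counts = counts.copy()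
--             new_counts[tile] -= 3
--             if remove_sets(new_counts):
--                 return True
--
--         # 嘗試順子（僅對萬/筒/索有效）
--         val, typ = tile
--         if typ in ['man', 'pin', 'sou']:
--             next1 = (val + 1, typ)
--             next2 = (val + 2, typ)
--             if counts.get(next1, 0) > 0 and counts.get(next2, 0) > 0:
--                 new_counts = counts.copy()
--                 new_counts[tile] -= 1
--                 new_counts[next1] -= 1
--                 new_counts[next2] -= 1
--                 if remove_sets(new_counts):
--                     return True
--
--     return False  # 沒有任何一種拆法成功
-- ===== SOURCE B (Python) =====
-- def remove_sets(counts) -> bool: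
--     """
--     Greedy meld decomposition: scan tiles in sorted order; the smallest
--     remaining tile must head all melds that use it, so (count % 3) sequences
--     starting at it are forced (the rest are triplets).  Linear pass, no DFS.
--     """
--     c = {t: n for t, n in counts.items() if n}
--     for tile in sorted(c):
--         n = c[tile]
--         if n == 0:
--             continue
--         val, typ = tile
--         if typ in ('man', 'pin', 'sou'):
--             s = n % 3
--             if s:
--                 n1, n2 = (val + 1, typ), (val + 2, typ)
--                 if c.get(n1, 0) < s or c.get(n2, 0) < s:
--                     return False
--                 c[n1] -= s
--                 c[n2] -= s
--         elif n % 3: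
--             return False
--     return True
-- ===== Notes on version B (the rewrite author's own statement) =====
-- stated objective: faster
-- what changed: A's exponential DFS (at every level it retries every tile as triplet and as sequence start on a copied Counter) is replaced by one greedy pass over the sorted tiles: the smallest remaining tile must head every meld using it, so count % 3 sequences and the remaining triplets are forced; intended as faster — measured 15.75x at n=16 and A times out at n=64 where B returns — though a timing run could not form a ratio at the largest size because A never finishes there; …
-- outside the precondition, e.g. on remove_sets({(1, 'man'): 1, (2, 'man'): -1}): A returns True, B returns False
import Mathlib
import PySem

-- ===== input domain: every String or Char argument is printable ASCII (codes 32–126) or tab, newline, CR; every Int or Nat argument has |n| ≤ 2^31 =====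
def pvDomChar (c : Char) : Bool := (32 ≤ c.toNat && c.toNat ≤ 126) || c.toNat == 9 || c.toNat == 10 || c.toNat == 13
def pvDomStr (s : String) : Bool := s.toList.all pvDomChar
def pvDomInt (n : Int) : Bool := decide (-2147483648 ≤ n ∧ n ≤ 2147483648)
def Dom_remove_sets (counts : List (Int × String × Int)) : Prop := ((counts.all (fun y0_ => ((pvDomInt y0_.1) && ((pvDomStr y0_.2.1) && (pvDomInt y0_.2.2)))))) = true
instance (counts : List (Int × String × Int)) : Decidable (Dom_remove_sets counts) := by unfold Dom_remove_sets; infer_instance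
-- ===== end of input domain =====

-- B replaces A's exponential try-every-tile DFS by one greedy pass over the sorted tiles
-- (the smallest remaining tile forces count % 3 sequences, the rest triplets): intended as
-- faster (timing: 15.75x at n=16; A timed out at n=64 where B returned).


-- ===== PORT A =====
def pvSuits : List String := ["man", "pin", "sou"]

-- positive tile mass: fuel bound for A's recursion (each recursive call removes at least
-- two tiles with positive count, so this is a strict upper bound on the recursion depth)
def pvPosMass (d : PySem.Dict (Int × String) Int) : Nat := (d.values.map Int.toNat).sum

mutual
-- the recursive function remove_sets itself (fuel only makes the recursion structural)
def pvGoA : Nat → PySem.Dict (Int × String) Int → Bool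
  | 0, _ => false   -- fuel exhausted: never reached, fuel starts above pvPosMass which strictly decreases
  | Nat.succ f, d =>
    if d.values.sum = 0 then true
    else pvLoopA f d (PySem.List.sorted2 d.keys (fun t => t.1) (fun t => t.2) false)
termination_by f d => (f, 0, 0)

-- 'for tile in sorted(counts): … return True' / fall through to 'return False'
def pvLoopA : Nat → PySem.Dict (Int × String) Int → List (Int × String) → Bool
  | _, _, [] => false
  | f, d, t :: rest => pvBodyA f d t || pvLoopA f d rest
termination_by f d ks => (f, 2, ks.length)

-- one iteration of the loop body: try a triplet, then try a sequence
def pvBodyA (f : Nat) (d : PySem.Dict (Int × String) Int) (t : Int × String) : Bool :=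
  if d.getD t 0 = 0 then false
  else
    (if 3 ≤ d.getD t 0 then pvGoA f (d.modify t 0 (fun x => x - 3)) else false)
    ||
    (if t.2 ∈ pvSuits then
      (if 0 < d.getD (t.1 + 1, t.2) 0 ∧ 0 < d.getD (t.1 + 2, t.2) 0 then
        pvGoA f (((d.modify t 0 (fun x => x - 1)).modify (t.1 + 1, t.2) 0
                   (fun x => x - 1)).modify (t.1 + 2, t.2) 0 (fun x => x - 1))
      else false)
    else false)
termination_by (f, 1, 0)
end

def remove_sets (counts : List (Int × String × Int)) : Bool :=
  let d := PySem.Dict.ofList (counts.map (fun x => ((x.1, x.2.1), x.2.2)))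
  pvGoA (pvPosMass d + 1) d

-- ===== PORT B =====
-- greedy pass over the sorted tiles of c = {t: n for t, n in counts.items() if n}
def pvAltLoop (c : PySem.Dict (Int × String) Int) : List (Int × String) → Bool
  | [] => true
  | t :: rest =>
    let n := c.getD t 0
    if n = 0 then pvAltLoop c rest
    else if t.2 ∈ pvSuits then
      let m := PySem.Int.mod n 3
      if m ≠ 0 then
        if c.getD (t.1 + 1, t.2) 0 < m ∨ c.getD (t.1 + 2, t.2) 0 < m then false
        else pvAltLoop ((c.modify (t.1 + 1, t.2) 0 (fun x => x - m)).modify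
                         (t.1 + 2, t.2) 0 (fun x => x - m)) rest
      else pvAltLoop c rest
    else if PySem.Int.mod n 3 ≠ 0 then false
    else pvAltLoop c rest

def remove_sets_alt (counts : List (Int × String × Int)) : Bool :=
  let d := PySem.Dict.ofList (counts.map (fun x => ((x.1, x.2.1), x.2.2)))
  let c := PySem.Dict.ofList (d.items.filter (fun p => !(p.2 == 0)))
  pvAltLoop c (PySem.List.sorted2 c.keys (fun t => t.1) (fun t => t.2) false)

-- ===== PRECONDITION & SPEC =====
-- Pre_ admits the natural domain of tile counts (every count nonnegative) and, beyond it,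
-- every input whose total tile sum is not divisible by 3 (both programs reject those).
-- Excluded are only inputs with a negative count and total divisible by 3: there A's
-- sum-based base case can report success for nonsense hands (see cites) and no behaviour
-- is the specified one.
def Pre_remove_sets (counts : List (Int × String × Int)) : Prop :=
  (∀ x ∈ counts, 0 ≤ x.2.2) ∨
  (PySem.Dict.ofList (counts.map (fun x => ((x.1, x.2.1), x.2.2)))).values.sum % 3 ≠ 0
instance (counts : List (Int × String × Int)) : Decidable (Pre_remove_sets counts) := by
  unfold Pre_remove_sets; infer_instance

def pvWitness_remove_sets : (List (Int × String × Int)) :=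
  [(1, "man", 1), (2, "man", 1), (3, "man", 1), (7, "wind", 3)]

def Spec_remove_sets (counts : List (Int × String × Int)) (out : Bool) : Prop := out = remove_sets_alt counts
instance (counts : List (Int × String × Int)) (out : Bool) : Decidable (Spec_remove_sets counts out) := by unfold Spec_remove_sets; infer_instance

-- ===== CLAIM (what is proved, stated in full; the proofs are below) =====
def Claim_equal_remove_sets : Prop := ∀ (counts : List (Int × String × Int)), Dom_remove_sets counts → Pre_remove_sets counts → Spec_remove_sets counts (remove_sets counts)

-- ===== LEMMAS AND PROOFS =====

-- the semantic yardstick both programs are measured against: the multiset of tiles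
-- (as a count function) decomposes into triplets and suited sequences
def pvDecTrip (F : (Int × String) → Nat) (t : Int × String) : (Int × String) → Nat :=
  fun u => if u = t then F u - 3 else F u

def pvDecSeq (F : (Int × String) → Nat) (v : Int) (s : String) : (Int × String) → Nat :=
  fun u => if u = (v, s) ∨ u = (v + 1, s) ∨ u = (v + 2, s) then F u - 1 else F u

inductive pvDecomp : ((Int × String) → Nat) → Prop where
  | zero (F) (h : ∀ u, F u = 0) : pvDecomp F
  | trip (F) (t : Int × String) (h3 : 3 ≤ F t) (hd : pvDecomp (pvDecTrip F t)) : pvDecomp F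
  | seq (F) (v : Int) (s : String) (hs : s ∈ pvSuits) (h0 : 1 ≤ F (v, s)) (h1 : 1 ≤ F (v + 1, s))
        (h2 : 1 ≤ F (v + 2, s)) (hd : pvDecomp (pvDecSeq F v s)) : pvDecomp F

-- count function of a dict state
def pvFd (d : PySem.Dict (Int × String) Int) : (Int × String) → Nat :=
  fun u => (d.getD u 0).toNat

-- count function of a dict state restricted to a key list
def pvFR (c : PySem.Dict (Int × String) Int) (ks : List (Int × String)) : (Int × String) → Nat :=
  fun u => if u ∈ ks then (c.getD u 0).toNat else 0

-- lexicographic key realising Python's tuple order on (val, typ)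
def pvKey (t : Int × String) : Lex (Int × String) := toLex t

-- residual state after greedily consuming all copies of suited tile (v,s): k triplets and a sequences
def pvRemove (F : (Int × String) → Nat) (v : Int) (s : String) (k a : Nat) : (Int × String) → Nat :=
  fun u => if u = (v, s) then F u - (3 * k + a)
           else if u = (v + 1, s) then F u - a
           else if u = (v + 2, s) then F u - a
           else F u

-- ---- generic list/sum helpers ----
lemma pvSum_lt {K : List (Int × String)} {f g : (Int × String) → Nat} {t : Int × String}
    (ht : t ∈ K) (hle : ∀ u, g u ≤ f u) (hlt : g t < f t) :
    (K.map g).sum < (K.map f).sum := by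
  induction K with
  | nil => cases ht
  | cons x K ih =>
    simp only [List.map_cons, List.sum_cons]
    rcases List.mem_cons.mp ht with rfl | hmem
    · have hs : (K.map g).sum ≤ (K.map f).sum :=
        List.sum_le_sum (by intro u _; exact hle u)
      omega
    · have h1 := ih hmem
      have h2 := hle x
      omega

-- ---- sorting ----
lemma pvSorted2_eq (xs : List (Int × String)) :
    PySem.List.sorted2 xs (fun t => t.1) (fun t => t.2) false
      = PySem.List.sorted xs pvKey false := by
  rw [PySem.List.sorted_eq_foldl_insertBy]
  show List.foldl _ _ _ = _
  have h : (fun (a b : Int × String) =>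
        (decide (a.1 < b.1) || (!decide (b.1 < a.1) && decide (a.2 < b.2))))
      = (fun (a b : Int × String) => decide (pvKey a < pvKey b)) := by
    funext a b
    by_cases h1 : a.1 < b.1 <;> by_cases h2 : b.1 < a.1 <;> by_cases h3 : a.2 < b.2 <;>
      simp [pvKey, Prod.Lex.toLex_lt_toLex, h1, h2, h3] <;> omega
  rw [h]
  simp

lemma pvSorted_perm (xs : List (Int × String)) :
    (PySem.List.sorted2 xs (fun t => t.1) (fun t => t.2) false).Perm xs :=
  PySem.List.sorted2_perm xs _ _ false

lemma pvSorted_strict (xs : List (Int × String)) (h : xs.Nodup) :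
    (PySem.List.sorted2 xs (fun t => t.1) (fun t => t.2) false).Pairwise
      (fun a b => pvKey a < pvKey b) := by
  have hle : (PySem.List.sorted2 xs (fun t => t.1) (fun t => t.2) false).Pairwise
      (fun a b => pvKey a ≤ pvKey b) := by
    rw [pvSorted2_eq]; exact PySem.List.sorted_pairwise xs pvKey
  have hnd : (PySem.List.sorted2 xs (fun t => t.1) (fun t => t.2) false).Nodup :=
    (pvSorted_perm xs).nodup_iff.mpr h
  exact (hle.and hnd).imp (fun {a b} hab =>
    lt_of_le_of_ne hab.1 (fun he => hab.2 (toLex.injective he)))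

-- ---- dict helpers ----
lemma pvUpdate_items (l : List ((Int × String) × Int)) :
    ∀ d : PySem.Dict (Int × String) Int, (∀ p ∈ l, d.contains p.1 = false) →
    (l.map Prod.fst).Nodup → (d.update l).items = d.items ++ l := by
  induction l with
  | nil => intro d _ _; simp [PySem.Dict.update]
  | cons p l ih =>
    intro d hc hnd
    rcases p with ⟨k, v⟩
    have hstep : d.update ((k, v) :: l) = (d.insert k v).update l := by
      simp [PySem.Dict.update]
    rw [hstep, ih (d.insert k v) ?_ ?_]
    · rw [PySem.Dict.items_insert_of_not_contains d v (hc (k, v) (List.mem_cons_self))]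
      simp
    · intro q hq
      rw [PySem.Dict.contains_insert]
      have hne : q.1 ≠ k := by
        intro he
        have : q.1 ∈ l.map Prod.fst := List.mem_map_of_mem hq
        rw [List.map_cons] at hnd
        exact (List.nodup_cons.mp hnd).1 (he ▸ this)
      simp [hne, hc q (List.mem_cons_of_mem _ hq)]
    · exact (List.nodup_cons.mp (by rw [List.map_cons] at hnd; exact hnd)).2

lemma pvUpdate_items_mem (l : List ((Int × String) × Int)) :
    ∀ (d : PySem.Dict (Int × String) Int), ∀ p ∈ (d.update l).items, p ∈ d.items ∨ p ∈ l := by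
  induction l with
  | nil => intro d p hp; exact Or.inl hp
  | cons q l ih =>
    intro d p hp
    have hstep : d.update (q :: l) = (d.insert q.1 q.2).update l := by
      simp [PySem.Dict.update]
    rw [hstep] at hp
    rcases ih (d.insert q.1 q.2) p hp with h | h
    · rcases (PySem.Dict.mem_items_insert _ _ _ _).mp h with h' | h'
      · exact Or.inr (by simp [h'])
      · exact Or.inl h'.1
    · exact Or.inr (List.mem_cons_of_mem _ h)

lemma pvOfList_items_mem (l : List ((Int × String) × Int)) :
    ∀ p ∈ (PySem.Dict.ofList l).items, p ∈ l := by
  intro p hp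
  rcases pvUpdate_items_mem l PySem.Dict.empty p hp with h | h
  · simp [PySem.Dict.empty] at h
  · exact h

-- ---- derived dict facts ----
lemma pvContains_of_getD_ne {d : PySem.Dict (Int × String) Int} {u : Int × String}
    (h : d.getD u 0 ≠ 0) : d.contains u = true := by
  by_contra hc
  exact h (PySem.Dict.getD_of_not_contains d 0 (Bool.not_eq_true _ ▸ hc))

lemma pvMass_eq_keys (d : PySem.Dict (Int × String) Int) (h : d.keys.Nodup) :
    pvPosMass d = (d.keys.map (fun k => (d.getD k 0).toNat)).sum := by
  unfold pvPosMass
  rw [PySem.Dict.values_eq_map_keys d h 0, List.map_map]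
  rfl

lemma pvSumZero_iff (d : PySem.Dict (Int × String) Int) (h : d.keys.Nodup)
    (hn : ∀ u, 0 ≤ d.getD u 0) :
    d.values.sum = 0 ↔ ∀ u, d.getD u 0 = 0 := by
  rw [PySem.Dict.values_eq_map_keys d h 0]
  constructor
  · intro hz u
    by_cases hu : d.contains u = true
    · exact List.all_zero_of_le_zero_le_of_sum_eq_zero
        (by intro x hx
            rcases List.mem_map.mp hx with ⟨k, _, rfl⟩
            exact hn k) hz
        (List.mem_map_of_mem ((PySem.Dict.contains_iff_mem_keys d u).mp hu))
    · exact PySem.Dict.getD_of_not_contains d 0 (by simpa using hu)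
  · intro hz
    have : d.keys.map (fun k => d.getD k 0) = d.keys.map (fun _ => (0 : Int)) :=
      List.map_congr_left (fun k _ => hz k)
    simp [this]

lemma pvSumPos (d : PySem.Dict (Int × String) Int) (h : d.keys.Nodup)
    (hn : ∀ u, 0 ≤ d.getD u 0) {t : Int × String} (ht : 0 < d.getD t 0) :
    d.values.sum ≠ 0 := by
  intro hz
  have := (pvSumZero_iff d h hn).mp hz t
  omega

-- keys are preserved by a modify at a contained key
lemma pvKeys_modify {d : PySem.Dict (Int × String) Int} {t : Int × String}
    (h : d.contains t = true) (f : Int → Int) : (d.modify t 0 f).keys = d.keys := by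
  rw [PySem.Dict.keys_modify]
  exact PySem.Dict.keys_insert_of_contains d _ h

-- ---- tile distinctness ----
lemma pvNe01 (v : Int) (s : String) : ((v, s) : Int × String) ≠ (v + 1, s) := by
  intro h; have := congrArg Prod.fst h; simp at this
lemma pvNe02 (v : Int) (s : String) : ((v, s) : Int × String) ≠ (v + 2, s) := by
  intro h; have := congrArg Prod.fst h; simp at this
lemma pvNe12 (v : Int) (s : String) : ((v + 1, s) : Int × String) ≠ (v + 2, s) := by
  intro h; have := congrArg Prod.fst h; simp at this

-- ---- the A-side state steps ----
lemma pvSeqGetD (d : PySem.Dict (Int × String) Int) (v : Int) (s : String) (u : Int × String) :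
    (((d.modify (v, s) 0 (fun x => x - 1)).modify (v + 1, s) 0
        (fun x => x - 1)).modify (v + 2, s) 0 (fun x => x - 1)).getD u 0
      = if u = (v, s) ∨ u = (v + 1, s) ∨ u = (v + 2, s) then d.getD u 0 - 1 else d.getD u 0 := by
  have ne01 := pvNe01 v s; have ne02 := pvNe02 v s; have ne12 := pvNe12 v s
  by_cases e0 : u = (v, s) <;> by_cases e1 : u = (v + 1, s) <;> by_cases e2 : u = (v + 2, s) <;>
    all_goals simp_all [PySem.Dict.getD_modify]

lemma pvFd_trip (d : PySem.Dict (Int × String) Int) (t : Int × String) :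
    pvFd (d.modify t 0 (fun x => x - 3)) = pvDecTrip (pvFd d) t := by
  funext u
  simp only [pvFd, pvDecTrip]
  rw [PySem.Dict.getD_modify]
  split_ifs with h
  · subst h; omega
  · rfl

lemma pvFd_seq (d : PySem.Dict (Int × String) Int) (v : Int) (s : String) :
    pvFd (((d.modify (v, s) 0 (fun x => x - 1)).modify (v + 1, s) 0
        (fun x => x - 1)).modify (v + 2, s) 0 (fun x => x - 1)) = pvDecSeq (pvFd d) v s := by
  funext u
  simp only [pvFd, pvDecSeq]
  rw [pvSeqGetD]
  split_ifs with h
  · rcases h with h | h | h <;> subst h <;> omega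
  · rfl

lemma pvKeys_trip {d : PySem.Dict (Int × String) Int} {t : Int × String}
    (h : d.getD t 0 ≠ 0) : (d.modify t 0 (fun x => x - 3)).keys = d.keys :=
  pvKeys_modify (pvContains_of_getD_ne h) _

lemma pvKeys_seq {d : PySem.Dict (Int × String) Int} {v : Int} {s : String}
    (h0 : d.getD (v, s) 0 ≠ 0) (h1 : 0 < d.getD (v + 1, s) 0) (h2 : 0 < d.getD (v + 2, s) 0) :
    (((d.modify (v, s) 0 (fun x => x - 1)).modify (v + 1, s) 0
        (fun x => x - 1)).modify (v + 2, s) 0 (fun x => x - 1)).keys = d.keys := by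
  have k0 : (d.modify (v, s) 0 (fun x => x - 1)).keys = d.keys :=
    pvKeys_modify (pvContains_of_getD_ne h0) _
  have g1 : (d.modify (v, s) 0 (fun x => x - 1)).getD (v + 1, s) 0 = d.getD (v + 1, s) 0 := by
    rw [PySem.Dict.getD_modify]; simp [(pvNe01 v s).symm]
  have k1 : ((d.modify (v, s) 0 (fun x => x - 1)).modify (v + 1, s) 0 (fun x => x - 1)).keys
      = d.keys := by
    rw [pvKeys_modify (pvContains_of_getD_ne (by rw [g1]; omega)) _, k0]
  have g2 : ((d.modify (v, s) 0 (fun x => x - 1)).modify (v + 1, s) 0 (fun x => x - 1)).getD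
      (v + 2, s) 0 = d.getD (v + 2, s) 0 := by
    rw [PySem.Dict.getD_modify, if_neg (pvNe12 v s).symm,
        PySem.Dict.getD_modify, if_neg (pvNe02 v s).symm]
  rw [pvKeys_modify (pvContains_of_getD_ne (by rw [g2]; omega)) _, k1]

lemma pvNonneg_trip {d : PySem.Dict (Int × String) Int} {t : Int × String}
    (hn : ∀ u, 0 ≤ d.getD u 0) (h3 : 3 ≤ d.getD t 0) :
    ∀ u, 0 ≤ (d.modify t 0 (fun x => x - 3)).getD u 0 := by
  intro u
  rw [PySem.Dict.getD_modify]
  have := hn u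
  split_ifs with h
  · omega
  · exact this

lemma pvNonneg_seq {d : PySem.Dict (Int × String) Int} {v : Int} {s : String}
    (hn : ∀ u, 0 ≤ d.getD u 0) (h0 : d.getD (v, s) 0 ≠ 0)
    (hp1 : 0 < d.getD (v + 1, s) 0) (hp2 : 0 < d.getD (v + 2, s) 0) :
    ∀ u, 0 ≤ (((d.modify (v, s) 0 (fun x => x - 1)).modify (v + 1, s) 0
        (fun x => x - 1)).modify (v + 2, s) 0 (fun x => x - 1)).getD u 0 := by
  intro u
  rw [pvSeqGetD]
  have h1 := hn u
  have h2 := hn (v, s)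
  split_ifs with h
  · rcases h with h | h | h <;> subst h <;> omega
  · exact h1

lemma pvMass_trip_lt {d : PySem.Dict (Int × String) Int} {t : Int × String}
    (hnd : d.keys.Nodup) (h3 : 3 ≤ d.getD t 0) :
    pvPosMass (d.modify t 0 (fun x => x - 3)) < pvPosMass d := by
  have hne : d.getD t 0 ≠ 0 := by omega
  have hk : (d.modify t 0 (fun x => x - 3)).keys = d.keys := pvKeys_trip hne
  rw [pvMass_eq_keys _ (hk ▸ hnd), pvMass_eq_keys d hnd, hk]
  refine pvSum_lt ((PySem.Dict.contains_iff_mem_keys d t).mp (pvContains_of_getD_ne hne)) ?_ ?_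
  · intro u
    rw [PySem.Dict.getD_modify]
    split_ifs with h
    · subst h; omega
    · omega
  · rw [PySem.Dict.getD_modify, if_pos rfl]; omega

lemma pvMass_seq_lt {d : PySem.Dict (Int × String) Int} {v : Int} {s : String}
    (hnd : d.keys.Nodup) (h0 : d.getD (v, s) 0 ≠ 0) (h1 : 0 < d.getD (v + 1, s) 0)
    (h2 : 0 < d.getD (v + 2, s) 0) :
    pvPosMass (((d.modify (v, s) 0 (fun x => x - 1)).modify (v + 1, s) 0
        (fun x => x - 1)).modify (v + 2, s) 0 (fun x => x - 1)) < pvPosMass d := by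
  have hk := pvKeys_seq h0 h1 h2
  rw [pvMass_eq_keys _ (hk ▸ hnd), pvMass_eq_keys d hnd, hk]
  refine pvSum_lt ((PySem.Dict.contains_iff_mem_keys d (v + 1, s)).mp
      (pvContains_of_getD_ne (by omega))) ?_ ?_
  · intro u
    rw [pvSeqGetD]
    split_ifs with h
    · omega
    · omega
  · rw [pvSeqGetD, if_pos (Or.inr (Or.inl rfl))]
    omega

-- ---- the combinatorial core: greedy consumption of the minimal tile is complete ----

-- a sequence meld tile is strictly above its anchor in Python's tuple order
lemma pvKey_lt_succ (w : Int) (s : String) (j : Int) (hj : 0 < j) :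
    pvKey (w, s) < pvKey (w + j, s) := by
  simp only [pvKey]
  rw [Prod.Lex.toLex_lt_toLex]
  left; simpa using hj

lemma pvRemove_zero (F : (Int × String) → Nat) (v : Int) (s : String) :
    pvRemove F v s 0 0 = F := by
  funext u; simp [pvRemove]

-- Stage 1: any decomposition splits the minimal suited tile's copies into k triplets
-- and a sequences anchored there, leaving a decomposable residue
lemma pvExist (v : Int) (s : String) :
    ∀ F, pvDecomp F → (∀ u, 0 < F u → ¬ pvKey u < pvKey (v, s)) →
    ∃ k a, F (v, s) = 3 * k + a ∧ a ≤ F (v + 1, s) ∧ a ≤ F (v + 2, s) ∧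
      pvDecomp (pvRemove F v s k a) := by
  intro F hD
  induction hD with
  | zero F h =>
    intro _
    exact ⟨0, 0, by simp [h], by omega, by omega, by rw [pvRemove_zero]; exact pvDecomp.zero F h⟩
  | trip F w h3 hd IH =>
    intro hmin
    have hmin' : ∀ u, 0 < pvDecTrip F w u → ¬ pvKey u < pvKey (v, s) := by
      intro u hu; apply hmin u
      simp only [pvDecTrip] at hu; split_ifs at hu <;> omega
    obtain ⟨k, a, hk, ha1, ha2, hrem⟩ := IH hmin'
    by_cases hw : w = (v, s)
    · subst hw
      have e0 : pvDecTrip F (v, s) (v, s) = F (v, s) - 3 := by simp [pvDecTrip]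
      have e1 : pvDecTrip F (v, s) (v + 1, s) = F (v + 1, s) := by
        simp [pvDecTrip, (pvNe01 v s).symm]
      have e2 : pvDecTrip F (v, s) (v + 2, s) = F (v + 2, s) := by
        simp [pvDecTrip, (pvNe02 v s).symm]
      refine ⟨k + 1, a, by omega, by omega, by omega, ?_⟩
      have hre : pvRemove F v s (k + 1) a = pvRemove (pvDecTrip F (v, s)) v s k a := by
        funext u; simp only [pvRemove, pvDecTrip]; split_ifs <;> omega
      rw [hre]; exact hrem
    · have e0 : pvDecTrip F w (v, s) = F (v, s) := by
        simp [pvDecTrip, Ne.symm hw]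
      have e1 : pvDecTrip F w (v + 1, s) ≤ F (v + 1, s) := by
        simp only [pvDecTrip]; split_ifs <;> omega
      have e2 : pvDecTrip F w (v + 2, s) ≤ F (v + 2, s) := by
        simp only [pvDecTrip]; split_ifs <;> omega
      refine ⟨k, a, by omega, by omega, by omega, ?_⟩
      refine pvDecomp.trip _ w ?_ ?_
      · -- the removed tile count at w still admits the triplet
        simp only [pvRemove]
        rw [if_neg hw]
        by_cases w1 : w = (v + 1, s)
        · subst w1
          rw [if_pos rfl]
          have hx : pvDecTrip F (v + 1, s) (v + 1, s) = F (v + 1, s) - 3 := by simp [pvDecTrip]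
          rw [hx] at ha1
          omega
        · rw [if_neg w1]
          by_cases w2 : w = (v + 2, s)
          · subst w2
            rw [if_pos rfl]
            have hx : pvDecTrip F (v + 2, s) (v + 2, s) = F (v + 2, s) - 3 := by simp [pvDecTrip]
            rw [hx] at ha2
            omega
          · rw [if_neg w2]; exact h3
      · have hre : pvDecTrip (pvRemove F v s k a) w = pvRemove (pvDecTrip F w) v s k a := by
          funext u; simp only [pvRemove, pvDecTrip]; split_ifs <;> omega
        rw [hre]; exact hrem
  | seq F w s' hs' h0 h1 h2 hd IH =>
    intro hmin
    have hmin' : ∀ u, 0 < pvDecSeq F w s' u → ¬ pvKey u < pvKey (v, s) := by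
      intro u hu; apply hmin u
      simp only [pvDecSeq] at hu; split_ifs at hu <;> omega
    obtain ⟨k, a, hk, ha1, ha2, hrem⟩ := IH hmin'
    have hmem0 : pvDecSeq F w s' (w, s') = F (w, s') - 1 := by
      simp [pvDecSeq]
    have hmem1 : pvDecSeq F w s' (w + 1, s') = F (w + 1, s') - 1 := by
      simp [pvDecSeq]
    have hmem2 : pvDecSeq F w s' (w + 2, s') = F (w + 2, s') - 1 := by
      simp [pvDecSeq]
    by_cases hw : (w, s') = (v, s)
    · -- the sequence is anchored at the minimal tile itself
      obtain ⟨hwv, hws⟩ : w = v ∧ s' = s := by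
        have hf := congrArg Prod.fst hw; have hsnd := congrArg Prod.snd hw
        exact ⟨hf, hsnd⟩
      subst hwv; subst hws
      have e0 : pvDecSeq F w s' (w, s') = F (w, s') - 1 := hmem0
      refine ⟨k, a + 1, by omega, by omega, by omega, ?_⟩
      have hre : pvRemove F w s' k (a + 1) = pvRemove (pvDecSeq F w s') w s' k a := by
        funext u; simp only [pvRemove, pvDecSeq]
        split_ifs <;> first | omega | tauto
      rw [hre]; exact hrem
    · -- the sequence does not touch the minimal tile
      have hne1 : (w + 1, s') ≠ (v, s) := by
        intro he
        exact hmin (w, s') (by omega) (he ▸ pvKey_lt_succ w s' 1 (by omega))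
      have hne2 : (w + 2, s') ≠ (v, s) := by
        intro he
        exact hmin (w, s') (by omega) (he ▸ pvKey_lt_succ w s' 2 (by omega))
      have e0 : pvDecSeq F w s' (v, s) = F (v, s) := by
        simp only [pvDecSeq]
        rw [if_neg]
        intro hc
        rcases hc with hc | hc | hc
        · exact hw hc.symm
        · exact hne1 hc.symm
        · exact hne2 hc.symm
      have e1 : pvDecSeq F w s' (v + 1, s) ≤ F (v + 1, s) := by
        simp only [pvDecSeq]; split_ifs <;> omega
      have e2 : pvDecSeq F w s' (v + 2, s) ≤ F (v + 2, s) := by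
        simp only [pvDecSeq]; split_ifs <;> omega
      refine ⟨k, a, by omega, by omega, by omega, ?_⟩
      refine pvDecomp.seq _ w s' hs' ?_ ?_ ?_ ?_
      · -- count at (w, s') survives the removal
        simp only [pvRemove]
        rw [if_neg hw]
        by_cases c1 : (w, s') = (v + 1, s)
        · rw [if_pos c1]
          have hx := ha1; rw [← c1, hmem0] at hx; omega
        · rw [if_neg c1]
          by_cases c2 : (w, s') = (v + 2, s)
          · rw [if_pos c2]
            have hx := ha2; rw [← c2, hmem0] at hx; omega
          · rw [if_neg c2]; exact h0
      · -- count at (w + 1, s') survives the removal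
        simp only [pvRemove]
        rw [if_neg hne1]
        by_cases c1 : (w + 1, s') = (v + 1, s)
        · rw [if_pos c1]
          have hx := ha1; rw [← c1, hmem1] at hx; omega
        · rw [if_neg c1]
          by_cases c2 : (w + 1, s') = (v + 2, s)
          · rw [if_pos c2]
            have hx := ha2; rw [← c2, hmem1] at hx; omega
          · rw [if_neg c2]; exact h1
      · -- count at (w + 2, s') survives the removal
        simp only [pvRemove]
        rw [if_neg hne2]
        by_cases c1 : (w + 2, s') = (v + 1, s)
        · rw [if_pos c1]
          have hx := ha1; rw [← c1, hmem2] at hx; omega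
        · rw [if_neg c1]
          by_cases c2 : (w + 2, s') = (v + 2, s)
          · rw [if_pos c2]
            have hx := ha2; rw [← c2, hmem2] at hx; omega
          · rw [if_neg c2]; exact h2
      · have hre : pvDecSeq (pvRemove F v s k a) w s' = pvRemove (pvDecSeq F w s') v s k a := by
          funext u; simp only [pvRemove, pvDecSeq]; split_ifs <;> omega
        rw [hre]; exact hrem

lemma pvRemove_at1 (F : (Int × String) → Nat) (v : Int) (s : String) (k a : Nat) :
    pvRemove F v s k a (v + 1, s) = F (v + 1, s) - a := by
  simp [pvRemove, (pvNe01 v s).symm]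

lemma pvRemove_at2 (F : (Int × String) → Nat) (v : Int) (s : String) (k a : Nat) :
    pvRemove F v s k a (v + 2, s) = F (v + 2, s) - a := by
  simp [pvRemove, (pvNe02 v s).symm, (pvNe12 v s).symm]

-- Stage 2: three sequences anchored at one tile can be traded for three triplets
lemma pvReduce (v : Int) (s : String) {F : (Int × String) → Nat} {k a : Nat} (h3 : 3 ≤ a)
    (hk : F (v, s) = 3 * k + a) (ha1 : a ≤ F (v + 1, s)) (ha2 : a ≤ F (v + 2, s))
    (hd : pvDecomp (pvRemove F v s k a)) :
    pvDecomp (pvRemove F v s (k + 1) (a - 3)) := by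
  refine pvDecomp.trip _ (v + 1, s) ?_ ?_
  · rw [pvRemove_at1]
    omega
  · refine pvDecomp.trip _ (v + 2, s) ?_ ?_
    · have hx : pvDecTrip (pvRemove F v s (k + 1) (a - 3)) (v + 1, s) (v + 2, s)
          = pvRemove F v s (k + 1) (a - 3) (v + 2, s) := by
        simp [pvDecTrip, (pvNe12 v s).symm]
      rw [hx, pvRemove_at2]
      omega
    · have hre : pvDecTrip (pvDecTrip (pvRemove F v s (k + 1) (a - 3)) (v + 1, s)) (v + 2, s)
          = pvRemove F v s k a := by
        have n01 := pvNe01 v s; have n02 := pvNe02 v s; have n12 := pvNe12 v s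
        funext u
        by_cases c0 : u = (v, s)
        · subst c0; simp [pvRemove, pvDecTrip, n01, n02]; omega
        · by_cases c1 : u = (v + 1, s)
          · subst c1; simp [pvRemove, pvDecTrip, n01.symm, n12]; omega
          · by_cases c2 : u = (v + 2, s)
            · subst c2; simp [pvRemove, pvDecTrip, n02.symm, n12.symm]; omega
            · simp [pvRemove, pvDecTrip, c0, c1, c2]
      rw [hre]; exact hd

-- normal form: the number of anchored sequences can be brought below three
lemma pvExistNorm (v : Int) (s : String) (F : (Int × String) → Nat) (hD : pvDecomp F)
    (hmin : ∀ u, 0 < F u → ¬ pvKey u < pvKey (v, s)) :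
    ∃ k a, a < 3 ∧ F (v, s) = 3 * k + a ∧ a ≤ F (v + 1, s) ∧ a ≤ F (v + 2, s) ∧
      pvDecomp (pvRemove F v s k a) := by
  obtain ⟨k, a, hk, ha1, ha2, hrem⟩ := pvExist v s F hD hmin
  clear hD hmin
  induction a using Nat.strong_induction_on generalizing k with
  | _ a IH =>
    by_cases ha : a < 3
    · exact ⟨k, a, ha, hk, ha1, ha2, hrem⟩
    · exact IH (a - 3) (by omega) (k + 1) (by omega) (by omega) (by omega)
        (pvReduce v s (by omega) hk ha1 ha2 hrem)

-- the converse: the greedily removed melds can be put back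
lemma pvUnpeel (v : Int) (s : String) (hs : s ∈ pvSuits) :
    ∀ k a (F : (Int × String) → Nat), F (v, s) = 3 * k + a → a ≤ F (v + 1, s) →
      a ≤ F (v + 2, s) → pvDecomp (pvRemove F v s k a) → pvDecomp F := by
  intro k
  induction k with
  | zero =>
    intro a
    induction a with
    | zero =>
      intro F hk _ _ hd
      rwa [pvRemove_zero] at hd
    | succ a IH =>
      intro F hk ha1 ha2 hd
      refine pvDecomp.seq F v s hs (by omega) (by omega) (by omega) ?_
      refine IH (pvDecSeq F v s) ?_ ?_ ?_ ?_
      · have : pvDecSeq F v s (v, s) = F (v, s) - 1 := by simp [pvDecSeq]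
        omega
      · have : pvDecSeq F v s (v + 1, s) = F (v + 1, s) - 1 := by simp [pvDecSeq]
        omega
      · have : pvDecSeq F v s (v + 2, s) = F (v + 2, s) - 1 := by simp [pvDecSeq]
        omega
      · have hre : pvRemove (pvDecSeq F v s) v s 0 a = pvRemove F v s 0 (a + 1) := by
          funext u
          simp only [pvRemove, pvDecSeq]
          split_ifs <;> first | omega | tauto
        rw [hre]; exact hd
  | succ k IH =>
    intro a F hk ha1 ha2 hd
    refine pvDecomp.trip F (v, s) (by omega) ?_
    refine IH a (pvDecTrip F (v, s)) ?_ ?_ ?_ ?_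
    · have : pvDecTrip F (v, s) (v, s) = F (v, s) - 3 := by simp [pvDecTrip]
      omega
    · have : pvDecTrip F (v, s) (v + 1, s) = F (v + 1, s) := by
        simp [pvDecTrip, (pvNe01 v s).symm]
      omega
    · have : pvDecTrip F (v, s) (v + 2, s) = F (v + 2, s) := by
        simp [pvDecTrip, (pvNe02 v s).symm]
      omega
    · have hre : pvRemove (pvDecTrip F (v, s)) v s k a = pvRemove F v s (k + 1) a := by
        funext u
        simp only [pvRemove, pvDecTrip]
        split_ifs <;> omega
      rw [hre]; exact hd

-- honor tiles can only ever sit in triplets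
lemma pvHonorPeel (t : Int × String) (ht : t.2 ∉ pvSuits) :
    ∀ F, pvDecomp F → 3 ∣ F t ∧ pvDecomp (fun u => if u = t then 0 else F u) := by
  intro F hD
  induction hD with
  | zero F h =>
    refine ⟨by simp [h], pvDecomp.zero _ ?_⟩
    intro u; by_cases h' : u = t <;> simp [h', h]
  | trip F w h3 hd IH =>
    by_cases hw : w = t
    · subst hw
      have e : pvDecTrip F w w = F w - 3 := by simp [pvDecTrip]
      refine ⟨by have := IH.1; rw [e] at this; omega, ?_⟩
      have hre : (fun u => if u = w then 0 else F u)
          = (fun u => if u = w then 0 else pvDecTrip F w u) := by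
        funext u; by_cases h' : u = w <;> simp [h', pvDecTrip]
      rw [hre]; exact IH.2
    · have hne : t ≠ w := fun h => hw h.symm
      have e : pvDecTrip F w t = F t := by simp [pvDecTrip, hne]
      refine ⟨by have := IH.1; rwa [e] at this, ?_⟩
      refine pvDecomp.trip _ w ?_ ?_
      · simpa [hw] using h3
      · have hre : pvDecTrip (fun u => if u = t then 0 else F u) w
            = (fun u => if u = t then 0 else pvDecTrip F w u) := by
          funext u
          by_cases h1 : u = t
          · subst h1; simp [pvDecTrip, hne]
          · by_cases h2 : u = w
            · subst h2; simp [pvDecTrip, h1]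
            · simp [pvDecTrip, h1, h2]
        rw [hre]; exact IH.2
  | seq F w s' hs' h0 h1 h2 hd IH =>
    have hne0 : (w, s') ≠ t := fun he => ht (he ▸ hs')
    have hne1 : (w + 1, s') ≠ t := fun he => ht (he ▸ hs')
    have hne2 : (w + 2, s') ≠ t := fun he => ht (he ▸ hs')
    have e : pvDecSeq F w s' t = F t := by
      simp only [pvDecSeq]
      rw [if_neg]
      intro hc
      rcases hc with hc | hc | hc
      · exact hne0 hc.symm
      · exact hne1 hc.symm
      · exact hne2 hc.symm
    refine ⟨by have := IH.1; rwa [e] at this, ?_⟩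
    refine pvDecomp.seq _ w s' hs' ?_ ?_ ?_ ?_
    · simpa [hne0] using h0
    · simpa [hne1] using h1
    · simpa [hne2] using h2
    · have hre : pvDecSeq (fun u => if u = t then 0 else F u) w s'
          = (fun u => if u = t then 0 else pvDecSeq F w s' u) := by
        funext u
        simp only [pvDecSeq]
        by_cases h' : u = t
        · subst h'
          rw [if_neg, if_pos rfl, if_pos rfl]
          intro hc
          rcases hc with hc | hc | hc
          · exact hne0 hc.symm
          · exact hne1 hc.symm
          · exact hne2 hc.symm
        · rw [if_neg h']
          split_ifs <;> simp [h']
      rw [hre]; exact IH.2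

-- honor unpeeling: putting the k triplets of an honor tile back
lemma pvUnpeelTrips (t : Int × String) :
    ∀ k (F : (Int × String) → Nat), F t = 3 * k →
      pvDecomp (fun u => if u = t then 0 else F u) → pvDecomp F := by
  intro k
  induction k with
  | zero =>
    intro F hk hd
    have : F = (fun u => if u = t then 0 else F u) := by
      funext u
      by_cases h' : u = t
      · simp [h']; omega
      · simp [h']
    rwa [this]
  | succ k IH =>
    intro F hk hd
    refine pvDecomp.trip F t (by omega) ?_
    refine IH (pvDecTrip F t) ?_ ?_
    · have : pvDecTrip F t t = F t - 3 := by simp [pvDecTrip]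
      omega
    · have hre : (fun u => if u = t then 0 else pvDecTrip F t u)
          = (fun u => if u = t then 0 else F u) := by
        funext u; by_cases h' : u = t <;> simp [h', pvDecTrip]
      rwa [hre]

-- ---- the A side: the DFS succeeds exactly on decomposable states ----
lemma pvLoopA_of_mem {f : Nat} {d : PySem.Dict (Int × String) Int}
    {ks : List (Int × String)} {t : Int × String} (ht : t ∈ ks)
    (hb : pvBodyA f d t = true) : pvLoopA f d ks = true := by
  induction ks with
  | nil => cases ht
  | cons x ks ih =>
    rw [pvLoopA]
    rcases List.mem_cons.mp ht with rfl | h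
    · simp [hb]
    · simp [ih h]

lemma pvLoopA_exists {f : Nat} {d : PySem.Dict (Int × String) Int}
    {ks : List (Int × String)} (h : pvLoopA f d ks = true) :
    ∃ t ∈ ks, pvBodyA f d t = true := by
  induction ks with
  | nil => rw [pvLoopA] at h; cases h
  | cons x ks ih =>
    rw [pvLoopA] at h
    rcases Bool.or_eq_true_iff.mp h with h' | h'
    · exact ⟨x, List.mem_cons_self, h'⟩
    · obtain ⟨t, ht, hb⟩ := ih h'
      exact ⟨t, List.mem_cons_of_mem _ ht, hb⟩

lemma pvGoA_sound : ∀ (f : Nat) (d : PySem.Dict (Int × String) Int), d.keys.Nodup →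
    (∀ u, 0 ≤ d.getD u 0) → pvGoA f d = true → pvDecomp (pvFd d) := by
  intro f
  induction f with
  | zero => intro d _ _ h; rw [pvGoA] at h; cases h
  | succ f IH =>
    intro d hnd hn h
    rw [pvGoA] at h
    by_cases hz : d.values.sum = 0
    · refine pvDecomp.zero _ ?_
      intro u
      have := (pvSumZero_iff d hnd hn).mp hz u
      simp [pvFd, this]
    · rw [if_neg hz] at h
      obtain ⟨t, _, hb⟩ := pvLoopA_exists h
      obtain ⟨v, s⟩ := t
      unfold pvBodyA at hb
      by_cases h0 : d.getD (v, s) 0 = 0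
      · rw [if_pos h0] at hb; cases hb
      rw [if_neg h0] at hb
      rcases Bool.or_eq_true_iff.mp hb with hb' | hb'
      · -- triplet branch
        by_cases h3 : 3 ≤ d.getD (v, s) 0
        · rw [if_pos h3] at hb'
          have hdec := IH _ ((pvKeys_trip h0) ▸ hnd) (pvNonneg_trip hn h3) hb'
          rw [pvFd_trip] at hdec
          refine pvDecomp.trip _ (v, s) ?_ hdec
          have := hn (v, s); simp only [pvFd]; omega
        · rw [if_neg h3] at hb'; cases hb'
      · -- sequence branch
        by_cases hsuit : ((v, s) : Int × String).2 ∈ pvSuits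
        · rw [if_pos hsuit] at hb'
          by_cases hp : 0 < d.getD ((v, s).1 + 1, (v, s).2) 0 ∧ 0 < d.getD ((v, s).1 + 2, (v, s).2) 0
          · rw [if_pos hp] at hb'
            obtain ⟨hp1, hp2⟩ := hp
            have hp1' : 0 < d.getD (v + 1, s) 0 := hp1
            have hp2' : 0 < d.getD (v + 2, s) 0 := hp2
            have hdec := IH _ ((pvKeys_seq h0 hp1' hp2') ▸ hnd)
              (pvNonneg_seq hn h0 hp1' hp2') hb'
            rw [pvFd_seq] at hdec
            refine pvDecomp.seq _ v s hsuit ?_ ?_ ?_ hdec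
            · have := hn (v, s); simp only [pvFd]; omega
            · simp only [pvFd]; omega
            · simp only [pvFd]; omega
          · rw [if_neg hp] at hb'; cases hb'
        · rw [if_neg hsuit] at hb'; cases hb'

lemma pvGoA_complete : ∀ F, pvDecomp F → ∀ (d : PySem.Dict (Int × String) Int) (f : Nat),
    d.keys.Nodup → (∀ u, 0 ≤ d.getD u 0) → pvFd d = F → pvPosMass d < f →
    pvGoA f d = true := by
  intro F hD
  induction hD with
  | zero F h =>
    intro d f hnd hn hfd hm
    obtain ⟨f, rfl⟩ : ∃ f', f = f' + 1 := ⟨f - 1, by omega⟩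
    rw [pvGoA]
    have hz : d.values.sum = 0 := (pvSumZero_iff d hnd hn).mpr (fun u => by
      have h1 := congrFun hfd u
      have h2 := h u
      have h3 := hn u
      simp only [pvFd] at h1
      omega)
    simp [hz]
  | trip F t h3 hd IH =>
    intro d f hnd hn hfd hm
    subst hfd
    obtain ⟨v, s⟩ := t
    have hg3 : 3 ≤ d.getD (v, s) 0 := by
      have := hn (v, s); simp only [pvFd] at h3; omega
    obtain ⟨f, rfl⟩ : ∃ f', f = f' + 1 := ⟨f - 1, by omega⟩
    rw [pvGoA]
    rw [if_neg (pvSumPos d hnd hn (t := (v, s)) (by omega))]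
    refine pvLoopA_of_mem (t := (v, s)) ?_ ?_
    · exact ((pvSorted_perm d.keys).mem_iff).mpr
        ((PySem.Dict.contains_iff_mem_keys d (v, s)).mp (pvContains_of_getD_ne (by omega)))
    · unfold pvBodyA
      rw [if_neg (by omega : ¬ d.getD (v, s) 0 = 0)]
      refine Bool.or_eq_true_iff.mpr (Or.inl ?_)
      rw [if_pos hg3]
      have hlt : pvPosMass (d.modify (v, s) 0 (fun x => x - 3)) < f := by
        have h' := pvMass_trip_lt (d := d) (t := (v, s)) hnd hg3
        omega
      have hnd' : (d.modify (v, s) 0 (fun x => x - 3)).keys.Nodup := by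
        rw [pvKeys_trip (d := d) (t := (v, s)) (by omega)]; exact hnd
      exact IH _ f hnd' (pvNonneg_trip hn hg3) (pvFd_trip d (v, s)) hlt
  | seq F v s hs h0 h1 h2 hd IH =>
    intro d f hnd hn hfd hm
    subst hfd
    have hg0 : 1 ≤ d.getD (v, s) 0 := by
      have := hn (v, s); simp only [pvFd] at h0; omega
    have hg1 : 0 < d.getD (v + 1, s) 0 := by
      have := hn (v + 1, s); simp only [pvFd] at h1; omega
    have hg2 : 0 < d.getD (v + 2, s) 0 := by
      have := hn (v + 2, s); simp only [pvFd] at h2; omega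
    obtain ⟨f, rfl⟩ : ∃ f', f = f' + 1 := ⟨f - 1, by omega⟩
    rw [pvGoA]
    rw [if_neg (pvSumPos d hnd hn (t := (v, s)) (by omega))]
    refine pvLoopA_of_mem (t := (v, s)) ?_ ?_
    · exact ((pvSorted_perm d.keys).mem_iff).mpr
        ((PySem.Dict.contains_iff_mem_keys d (v, s)).mp (pvContains_of_getD_ne (by omega)))
    · unfold pvBodyA
      rw [if_neg (by omega : ¬ d.getD (v, s) 0 = 0)]
      refine Bool.or_eq_true_iff.mpr (Or.inr ?_)
      rw [if_pos hs]
      rw [if_pos ⟨hg1, hg2⟩]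
      have hlt : pvPosMass (((d.modify (v, s) 0 (fun x => x - 1)).modify (v + 1, s) 0
          (fun x => x - 1)).modify (v + 2, s) 0 (fun x => x - 1)) < f := by
        have h' := pvMass_seq_lt (d := d) (v := v) (s := s) hnd (by omega) hg1 hg2
        omega
      have hnd' : (((d.modify (v, s) 0 (fun x => x - 1)).modify (v + 1, s) 0
          (fun x => x - 1)).modify (v + 2, s) 0 (fun x => x - 1)).keys.Nodup := by
        rw [pvKeys_seq (d := d) (v := v) (s := s) (by omega) hg1 hg2]; exact hnd
      exact IH _ f hnd' (pvNonneg_seq hn (by omega) hg1 hg2) (pvFd_seq d v s) hlt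

-- ---- the B side: the greedy pass succeeds exactly on decomposable states ----
lemma pvBGetD (c : PySem.Dict (Int × String) Int) (v : Int) (s : String) (m : Int)
    (u : Int × String) :
    ((c.modify (v + 1, s) 0 (fun x => x - m)).modify (v + 2, s) 0 (fun x => x - m)).getD u 0
      = if u = (v + 1, s) then c.getD u 0 - m
        else if u = (v + 2, s) then c.getD u 0 - m else c.getD u 0 := by
  have n12 := pvNe12 v s
  by_cases e1 : u = (v + 1, s) <;> by_cases e2 : u = (v + 2, s) <;>
    simp_all [PySem.Dict.getD_modify]

lemma pvClosure_tail {c : PySem.Dict (Int × String) Int} {v : Int} {s : String}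
    {rest : List (Int × String)}
    (hhead : ∀ x ∈ rest, pvKey (v, s) < pvKey x)
    (hcl : ∀ t ∈ (v, s) :: rest, t.2 ∈ pvSuits →
      (0 < c.getD (t.1 + 1, t.2) 0 → (t.1 + 1, t.2) ∈ (v, s) :: rest) ∧
      (0 < c.getD (t.1 + 2, t.2) 0 → (t.1 + 2, t.2) ∈ (v, s) :: rest)) :
    ∀ t ∈ rest, t.2 ∈ pvSuits →
      (0 < c.getD (t.1 + 1, t.2) 0 → (t.1 + 1, t.2) ∈ rest) ∧
      (0 < c.getD (t.1 + 2, t.2) 0 → (t.1 + 2, t.2) ∈ rest) := by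
  intro t ht hs
  obtain ⟨m1, m2⟩ := hcl t (List.mem_cons_of_mem _ ht) hs
  have hsucc : ∀ j : Int, 0 < j → (t.1 + j, t.2) ∈ (v, s) :: rest → (t.1 + j, t.2) ∈ rest := by
    intro j hj hmem
    rcases List.mem_cons.mp hmem with he | hr
    · exfalso
      have hlt1 : pvKey (v, s) < pvKey t := hhead t ht
      have hlt2 : pvKey t < pvKey (t.1 + j, t.2) := by
        have := pvKey_lt_succ t.1 t.2 j hj
        simpa using this
      rw [he] at hlt2
      exact lt_irrefl _ (hlt1.trans hlt2)
    · exact hr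
  exact ⟨fun hp => hsucc 1 (by omega) (m1 hp), fun hp => hsucc 2 (by omega) (m2 hp)⟩

-- residual state identity: the greedy removal at the head equals the modified dict on the tail
lemma pvGreedyId {c : PySem.Dict (Int × String) Int} {v : Int} {s : String}
    {rest : List (Int × String)} (htnr : (v, s) ∉ rest) (k a : Nat)
    (hk : (c.getD (v, s) 0).toNat = 3 * k + a)
    (hm1 : (a : Int) ≤ c.getD (v + 1, s) 0) (hm2 : (a : Int) ≤ c.getD (v + 2, s) 0) :
    pvRemove (pvFR c ((v, s) :: rest)) v s k a
      = pvFR ((c.modify (v + 1, s) 0 (fun x => x - (a : Int))).modify (v + 2, s) 0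
          (fun x => x - (a : Int))) rest := by
  have n01 := pvNe01 v s; have n02 := pvNe02 v s; have n12 := pvNe12 v s
  funext u
  by_cases e0 : u = (v, s)
  · subst e0
    simp only [pvRemove, pvFR, if_pos rfl, List.mem_cons, true_or, if_pos]
    rw [if_neg htnr]
    omega
  · by_cases e1 : u = (v + 1, s)
    · subst e1
      rw [pvRemove_at1]
      by_cases hr : ((v + 1, s) : Int × String) ∈ rest <;>
        simp only [pvFR, pvBGetD, if_pos rfl, List.mem_cons, hr, n01.symm, false_or,
          if_pos, if_neg, if_true, if_false, or_false] <;>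
        simp [hr] <;> omega
    · by_cases e2 : u = (v + 2, s)
      · subst e2
        rw [pvRemove_at2]
        by_cases hr : ((v + 2, s) : Int × String) ∈ rest <;>
          simp only [pvFR, pvBGetD, List.mem_cons, hr, n02.symm, false_or] <;>
          simp [hr, pvBGetD, n12.symm] <;> omega
      · have hrem : pvRemove (pvFR c ((v, s) :: rest)) v s k a u
            = pvFR c ((v, s) :: rest) u := by
          simp [pvRemove, e0, e1, e2]
        rw [hrem]
        have hbg : ((c.modify (v + 1, s) 0 (fun x => x - (a : Int))).modify (v + 2, s) 0
            (fun x => x - (a : Int))).getD u 0 = c.getD u 0 := by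
          rw [pvBGetD]; simp [e1, e2]
        simp [pvFR, List.mem_cons, e0, hbg]

-- the zero-subtraction step leaves the state unchanged
lemma pvFR_sub_zero {c : PySem.Dict (Int × String) Int} {v : Int} {s : String}
    (rest : List (Int × String)) :
    pvFR ((c.modify (v + 1, s) 0 (fun x => x - ((0 : Nat) : Int))).modify (v + 2, s) 0
      (fun x => x - ((0 : Nat) : Int))) rest = pvFR c rest := by
  funext u
  simp only [pvFR, pvBGetD]
  split_ifs <;> simp

-- dropping a zero-count head tile
lemma pvFR_cons_zero {c : PySem.Dict (Int × String) Int} {t : Int × String}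
    {rest : List (Int × String)} (htnr : t ∉ rest) (h0 : (c.getD t 0).toNat = 0) :
    pvFR c (t :: rest) = pvFR c rest := by
  funext u
  by_cases hu : u = t
  · subst hu; simp [pvFR, htnr, h0]
  · simp [pvFR, List.mem_cons, hu]

-- masking the head tile equals restricting to the tail
lemma pvMaskId {c : PySem.Dict (Int × String) Int} {t : Int × String}
    {rest : List (Int × String)} (htnr : t ∉ rest) :
    (fun u => if u = t then 0 else pvFR c (t :: rest) u) = pvFR c rest := by
  funext u
  by_cases hu : u = t
  · subst hu; simp [pvFR, htnr]
  · simp [pvFR, List.mem_cons, hu]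

lemma pvAltLoop_iff : ∀ (ks : List (Int × String)) (c : PySem.Dict (Int × String) Int),
    (∀ u, 0 ≤ c.getD u 0) →
    ks.Pairwise (fun a b => pvKey a < pvKey b) →
    (∀ t ∈ ks, t.2 ∈ pvSuits →
      (0 < c.getD (t.1 + 1, t.2) 0 → (t.1 + 1, t.2) ∈ ks) ∧
      (0 < c.getD (t.1 + 2, t.2) 0 → (t.1 + 2, t.2) ∈ ks)) →
    (pvAltLoop c ks = true ↔ pvDecomp (pvFR c ks)) := by
  intro ks
  induction ks with
  | nil =>
    intro c _ _ _
    rw [pvAltLoop]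
    constructor
    · intro _; exact pvDecomp.zero _ (fun u => by simp [pvFR])
    · intro _; rfl
  | cons t rest IH =>
    intro c hn hpw hcl
    obtain ⟨v, s⟩ := t
    have hhead : ∀ x ∈ rest, pvKey (v, s) < pvKey x := (List.pairwise_cons.mp hpw).1
    have hpwr : rest.Pairwise (fun a b => pvKey a < pvKey b) := (List.pairwise_cons.mp hpw).2
    have htnr : ((v, s) : Int × String) ∉ rest := fun hmem => lt_irrefl _ (hhead _ hmem)
    have hclr := pvClosure_tail hhead hcl
    have hmin : ∀ u, 0 < pvFR c ((v, s) :: rest) u → ¬ pvKey u < pvKey (v, s) := by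
      intro u hu hlt
      have humem : u ∈ (v, s) :: rest := by
        by_contra hx; simp [pvFR, hx] at hu
      rcases List.mem_cons.mp humem with rfl | hr
      · exact lt_irrefl _ hlt
      · exact lt_asymm hlt (hhead u hr)
    have hFt : pvFR c ((v, s) :: rest) (v, s) = (c.getD (v, s) 0).toNat := by
      simp [pvFR]
    by_cases h0 : c.getD (v, s) 0 = 0
    · -- zero count: skip the head
      have hstep : pvAltLoop c ((v, s) :: rest) = pvAltLoop c rest := by
        simp only [pvAltLoop]; rw [if_pos h0]
      rw [hstep, pvFR_cons_zero htnr (by omega)]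
      exact IH c hn hpwr hclr
    · have hNpos : 0 < c.getD (v, s) 0 := lt_of_le_of_ne (hn (v, s)) (Ne.symm h0)
      by_cases hsuit : s ∈ pvSuits
      · -- suited tile
        have hmod : PySem.Int.mod (c.getD (v, s) 0) 3 = c.getD (v, s) 0 % 3 :=
          PySem.Int.mod_eq_emod_of_pos (by omega)
        by_cases hmz : PySem.Int.mod (c.getD (v, s) 0) 3 = 0
        · -- count divisible by three: only triplets, state unchanged
          have hstep : pvAltLoop c ((v, s) :: rest) = pvAltLoop c rest := by
            simp only [pvAltLoop]
            rw [if_neg h0, if_pos hsuit, if_neg (by simpa using hmz)]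
          rw [hstep, IH c hn hpwr hclr]
          have hdvd : (c.getD (v, s) 0).toNat % 3 = 0 := by
            rw [hmod] at hmz; omega
          constructor
          · intro hD
            refine pvUnpeel v s hsuit ((c.getD (v, s) 0).toNat / 3) 0 _
              (by rw [hFt]; omega) (by omega) (by omega) ?_
            rw [pvGreedyId htnr ((c.getD (v, s) 0).toNat / 3) 0 (by omega)
              (by have := hn (v + 1, s); omega) (by have := hn (v + 2, s); omega),
              pvFR_sub_zero]
            exact hD
          · intro hD
            obtain ⟨k, a, ha3, hk, _, _, hrem⟩ :=
              pvExistNorm v s (pvFR c ((v, s) :: rest)) hD hmin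
            rw [hFt] at hk
            have ha0 : a = 0 := by omega
            subst ha0
            rw [pvGreedyId htnr k 0 (by omega) (by have := hn (v + 1, s); omega)
              (by have := hn (v + 2, s); omega), pvFR_sub_zero] at hrem
            exact hrem
        · -- some sequences are forced
          have hmpos : 0 < PySem.Int.mod (c.getD (v, s) 0) 3 ∧
              PySem.Int.mod (c.getD (v, s) 0) 3 < 3 := by rw [hmod]; omega
          by_cases hguard : c.getD (v + 1, s) 0 < PySem.Int.mod (c.getD (v, s) 0) 3 ∨
              c.getD (v + 2, s) 0 < PySem.Int.mod (c.getD (v, s) 0) 3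
          · -- a forced sequence is missing a tile: fail, and no decomposition exists
            have hstep : pvAltLoop c ((v, s) :: rest) = false := by
              simp only [pvAltLoop]
              rw [if_neg h0, if_pos hsuit, if_pos (by simpa using hmz), if_pos hguard]
            rw [hstep]
            constructor
            · intro h; cases h
            · intro hD
              exfalso
              obtain ⟨k, a, ha3, hk, ha1, ha2, _⟩ :=
                pvExistNorm v s (pvFR c ((v, s) :: rest)) hD hmin
              rw [hFt] at hk
              have hb1 : pvFR c ((v, s) :: rest) (v + 1, s) ≤ (c.getD (v + 1, s) 0).toNat := by
                simp only [pvFR]; split_ifs <;> omega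
              have hb2 : pvFR c ((v, s) :: rest) (v + 2, s) ≤ (c.getD (v + 2, s) 0).toNat := by
                simp only [pvFR]; split_ifs <;> omega
              rw [hmod] at hguard
              rcases hguard with hg | hg <;> omega
          · -- remove the forced sequences and recurse
            push_neg at hguard
            obtain ⟨hg1, hg2⟩ := hguard
            have hstep : pvAltLoop c ((v, s) :: rest)
                = pvAltLoop ((c.modify (v + 1, s) 0
                    (fun x => x - PySem.Int.mod (c.getD (v, s) 0) 3)).modify (v + 2, s) 0
                    (fun x => x - PySem.Int.mod (c.getD (v, s) 0) 3)) rest := by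
              simp only [pvAltLoop]
              rw [if_neg h0, if_pos hsuit, if_pos (by simpa using hmz),
                if_neg (by push_neg; exact ⟨hg1, hg2⟩)]
            have hm0 : 0 ≤ PySem.Int.mod (c.getD (v, s) 0) 3 := by rw [hmod]; omega
            have hcast : (((PySem.Int.mod (c.getD (v, s) 0) 3).toNat : Int))
                = PySem.Int.mod (c.getD (v, s) 0) 3 := by omega
            have hn' : ∀ u, 0 ≤ ((c.modify (v + 1, s) 0
                (fun x => x - PySem.Int.mod (c.getD (v, s) 0) 3)).modify (v + 2, s) 0
                (fun x => x - PySem.Int.mod (c.getD (v, s) 0) 3)).getD u 0 := by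
              intro u; rw [pvBGetD]; split_ifs with hx hy
              · subst hx; omega
              · subst hy; omega
              · exact hn u
            have hclr' : ∀ t ∈ rest, t.2 ∈ pvSuits →
                (0 < ((c.modify (v + 1, s) 0
                  (fun x => x - PySem.Int.mod (c.getD (v, s) 0) 3)).modify (v + 2, s) 0
                  (fun x => x - PySem.Int.mod (c.getD (v, s) 0) 3)).getD (t.1 + 1, t.2) 0 →
                  (t.1 + 1, t.2) ∈ rest) ∧
                (0 < ((c.modify (v + 1, s) 0
                  (fun x => x - PySem.Int.mod (c.getD (v, s) 0) 3)).modify (v + 2, s) 0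
                  (fun x => x - PySem.Int.mod (c.getD (v, s) 0) 3)).getD (t.1 + 2, t.2) 0 →
                  (t.1 + 2, t.2) ∈ rest) := by
              intro t' ht' hs'
              obtain ⟨m1, m2⟩ := hclr t' ht' hs'
              constructor
              · intro hp; apply m1; rw [pvBGetD] at hp; revert hp; split_ifs with hx hy
                · rw [hx]; omega
                · rw [hy]; omega
                · exact id
              · intro hp; apply m2; rw [pvBGetD] at hp; revert hp; split_ifs with hx hy
                · rw [hx]; omega
                · rw [hy]; omega
                · exact id
            rw [hstep, IH _ hn' hpwr hclr']
            have hid : ∀ k : Nat,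
                (c.getD (v, s) 0).toNat = 3 * k + (PySem.Int.mod (c.getD (v, s) 0) 3).toNat →
                pvRemove (pvFR c ((v, s) :: rest)) v s k
                    (PySem.Int.mod (c.getD (v, s) 0) 3).toNat
                  = pvFR ((c.modify (v + 1, s) 0
                      (fun x => x - PySem.Int.mod (c.getD (v, s) 0) 3)).modify (v + 2, s) 0
                      (fun x => x - PySem.Int.mod (c.getD (v, s) 0) 3)) rest := by
              intro k hk
              have hgi := pvGreedyId (c := c) htnr k (PySem.Int.mod (c.getD (v, s) 0) 3).toNat
                hk (by omega) (by omega)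
              rwa [hcast] at hgi
            constructor
            · intro hD
              refine pvUnpeel v s hsuit ((c.getD (v, s) 0).toNat / 3)
                (PySem.Int.mod (c.getD (v, s) 0) 3).toNat _ ?_ ?_ ?_ ?_
              · rw [hFt, hmod]; omega
              · have hmem1 : ((v + 1, s) : Int × String) ∈ (v, s) :: rest := by
                  have mc : 0 < c.getD (v + 1, s) 0 →
                      ((v + 1, s) : Int × String) ∈ (v, s) :: rest :=
                    (hcl (v, s) List.mem_cons_self hsuit).1
                  exact mc (by omega)
                simp only [pvFR, if_pos hmem1]
                omega
              · have hmem2 : ((v + 2, s) : Int × String) ∈ (v, s) :: rest := by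
                  have mc : 0 < c.getD (v + 2, s) 0 →
                      ((v + 2, s) : Int × String) ∈ (v, s) :: rest :=
                    (hcl (v, s) List.mem_cons_self hsuit).2
                  exact mc (by omega)
                simp only [pvFR, if_pos hmem2]
                omega
              · rw [hid _ (by rw [hmod]; omega)]
                exact hD
            · intro hD
              obtain ⟨k, a, ha3, hk, ha1, ha2, hrem⟩ :=
                pvExistNorm v s (pvFR c ((v, s) :: rest)) hD hmin
              rw [hFt] at hk
              have ham : a = (PySem.Int.mod (c.getD (v, s) 0) 3).toNat := by
                rw [hmod] at *; omega
              subst ham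
              rw [hid k hk] at hrem
              exact hrem
      · -- honor tile
        have hmod : PySem.Int.mod (c.getD (v, s) 0) 3 = c.getD (v, s) 0 % 3 :=
          PySem.Int.mod_eq_emod_of_pos (by omega)
        have hns : ((v, s) : Int × String).2 ∉ pvSuits := hsuit
        by_cases hmz : PySem.Int.mod (c.getD (v, s) 0) 3 = 0
        · have hstep : pvAltLoop c ((v, s) :: rest) = pvAltLoop c rest := by
            simp only [pvAltLoop]
            rw [if_neg h0, if_neg hsuit, if_neg (by simpa using hmz)]
          rw [hstep, IH c hn hpwr hclr]
          constructor
          · intro hD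
            refine pvUnpeelTrips (v, s) ((c.getD (v, s) 0).toNat / 3) _ ?_ ?_
            · rw [hFt]; rw [hmod] at hmz; omega
            · rwa [pvMaskId htnr]
          · intro hD
            have := (pvHonorPeel (v, s) hns _ hD).2
            rwa [pvMaskId htnr] at this
        · have hstep : pvAltLoop c ((v, s) :: rest) = false := by
            simp only [pvAltLoop]
            rw [if_neg h0, if_neg hsuit, if_pos (by simpa using hmz)]
          rw [hstep]
          constructor
          · intro h; cases h
          · intro hD
            exfalso
            have hdvd := (pvHonorPeel (v, s) hns _ hD).1
            rw [hFt] at hdvd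
            rw [hmod] at hmz
            omega

-- ---- bridging the two ports' states ----
lemma pvFilter_items (d0 : PySem.Dict (Int × String) Int) (hnd : d0.keys.Nodup) :
    (PySem.Dict.ofList (d0.items.filter (fun p => !(p.2 == 0)))).items
      = d0.items.filter (fun p => !(p.2 == 0)) := by
  have hnd' : ((d0.items.filter (fun p => !(p.2 == 0))).map Prod.fst).Nodup := by
    have hsub : ((d0.items.filter (fun p => !(p.2 == 0))).map Prod.fst).Sublist
        (d0.items.map Prod.fst) := List.filter_sublist.map _
    have : (d0.items.map Prod.fst).Nodup := by
      simpa [PySem.Dict.keys] using hnd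
    exact this.sublist hsub
  have h := pvUpdate_items (d0.items.filter (fun p => !(p.2 == 0))) PySem.Dict.empty
    (fun p _ => PySem.Dict.contains_empty p.1) hnd'
  simpa [PySem.Dict.ofList, PySem.Dict.empty] using h

lemma pvFilter_nodup (d0 : PySem.Dict (Int × String) Int) :
    (PySem.Dict.ofList (d0.items.filter (fun p => !(p.2 == 0)))).keys.Nodup :=
  PySem.Dict.nodup_keys_ofList _

lemma pvFilter_getD (d0 : PySem.Dict (Int × String) Int) (hnd : d0.keys.Nodup) (u : Int × String) :
    (PySem.Dict.ofList (d0.items.filter (fun p => !(p.2 == 0)))).getD u 0 = d0.getD u 0 := by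
  have hcn := pvFilter_nodup d0
  rw [PySem.Dict.getD_eq_get?_getD, PySem.Dict.getD_eq_get?_getD]
  cases hq : d0.get? u with
  | none =>
    cases hq' : (PySem.Dict.ofList (d0.items.filter (fun p => !(p.2 == 0)))).get? u with
    | none => rfl
    | some y =>
      exfalso
      have hm := (PySem.Dict.get?_eq_some_iff_mem_items _ u y hcn).mp hq'
      rw [pvFilter_items d0 hnd] at hm
      have hm' : (u, y) ∈ d0.items := List.mem_of_mem_filter hm
      have := (PySem.Dict.get?_eq_some_iff_mem_items d0 u y hnd).mpr hm'
      rw [hq] at this; cases this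
  | some x =>
    by_cases hx : x = 0
    · subst hx
      cases hq' : (PySem.Dict.ofList (d0.items.filter (fun p => !(p.2 == 0)))).get? u with
      | none => rfl
      | some y =>
        exfalso
        have hm := (PySem.Dict.get?_eq_some_iff_mem_items _ u y hcn).mp hq'
        rw [pvFilter_items d0 hnd] at hm
        have hy : y ≠ 0 := by
          have := List.of_mem_filter hm
          simpa using this
        have hm' : (u, y) ∈ d0.items := List.mem_of_mem_filter hm
        have := (PySem.Dict.get?_eq_some_iff_mem_items d0 u y hnd).mpr hm'
        rw [hq] at this
        exact hy (by injection this with h; omega)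
    · have hm : (u, x) ∈ d0.items.filter (fun p => !(p.2 == 0)) := by
        refine List.mem_filter.mpr ⟨PySem.Dict.mem_items_of_get?_eq_some d0 hq, ?_⟩
        simpa using hx
      rw [← pvFilter_items d0 hnd] at hm
      rw [(PySem.Dict.get?_eq_some_iff_mem_items _ u x hcn).mpr hm]

lemma pvFilter_keys (d0 : PySem.Dict (Int × String) Int) (hnd : d0.keys.Nodup) (u : Int × String) :
    u ∈ (PySem.Dict.ofList (d0.items.filter (fun p => !(p.2 == 0)))).keys ↔ d0.getD u 0 ≠ 0 := by
  have hcn := pvFilter_nodup d0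
  constructor
  · intro hu
    have hc : (PySem.Dict.ofList (d0.items.filter (fun p => !(p.2 == 0)))).contains u = true :=
      (PySem.Dict.contains_iff_mem_keys _ u).mpr hu
    rw [PySem.Dict.contains_eq_isSome_get?] at hc
    obtain ⟨y, hy⟩ := Option.isSome_iff_exists.mp hc
    have hm := (PySem.Dict.get?_eq_some_iff_mem_items _ u y hcn).mp hy
    rw [pvFilter_items d0 hnd] at hm
    have hy0 : y ≠ 0 := by simpa using List.of_mem_filter hm
    have hm' : (u, y) ∈ d0.items := List.mem_of_mem_filter hm
    rw [PySem.Dict.getD_of_mem_items d0 hm' hnd 0]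
    exact hy0
  · intro h0
    have hmem : (u, d0.getD u 0) ∈ d0.items := by
      cases hq : d0.get? u with
      | none =>
        exfalso
        rw [PySem.Dict.getD_eq_get?_getD, hq] at h0
        simp at h0
      | some x =>
        have hx := PySem.Dict.mem_items_of_get?_eq_some d0 hq
        rw [PySem.Dict.getD_eq_get?_getD, hq]
        simpa using hx
    have hm : (u, d0.getD u 0) ∈ d0.items.filter (fun p => !(p.2 == 0)) :=
      List.mem_filter.mpr ⟨hmem, by simpa using h0⟩
    rw [← pvFilter_items d0 hnd] at hm
    exact PySem.Dict.mem_keys_of_mem_items _ hm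

lemma pvD0_nonneg (counts : List (Int × String × Int)) (hpre : ∀ x ∈ counts, 0 ≤ x.2.2) :
    ∀ u, 0 ≤ (PySem.Dict.ofList (counts.map (fun x => ((x.1, x.2.1), x.2.2)))).getD u 0 := by
  intro u
  rw [PySem.Dict.getD_eq_get?_getD]
  cases hq : (PySem.Dict.ofList (counts.map (fun x => ((x.1, x.2.1), x.2.2)))).get? u with
  | none => simp
  | some x =>
    have hmem := PySem.Dict.mem_items_of_get?_eq_some _ hq
    have hl := pvOfList_items_mem _ _ hmem
    rcases List.mem_map.mp hl with ⟨y, hy, he⟩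
    have hx : x = y.2.2 := (congrArg Prod.snd he).symm
    simpa [hx] using hpre y hy

-- ---- both programs reject a hand whose total is not a multiple of three ----
lemma pvSumInt_delta : ∀ {K : List (Int × String)} {f g : (Int × String) → Int}, K.Nodup →
    ∀ {t}, t ∈ K → (∀ u ∈ K, u ≠ t → g u = f u) →
    (K.map g).sum = (K.map f).sum + (g t - f t) := by
  intro K f g hnd t ht h
  induction K with
  | nil => cases ht
  | cons x K ih =>
    simp only [List.map_cons, List.sum_cons]
    rcases List.mem_cons.mp ht with rfl | hmem
    · have htl : (K.map g).sum = (K.map f).sum := by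
        apply congrArg
        apply List.map_congr_left
        intro u hu
        exact h u (List.mem_cons_of_mem _ hu)
          (fun he => (List.nodup_cons.mp hnd).1 (he ▸ hu))
      rw [htl]; ring
    · have hx : g x = f x :=
        h x List.mem_cons_self (fun he => (List.nodup_cons.mp hnd).1 (he ▸ hmem))
      rw [hx, ih (List.nodup_cons.mp hnd).2 hmem
        (fun u hu hne => h u (List.mem_cons_of_mem _ hu) hne)]
      ring

lemma pvSum_modify (d : PySem.Dict (Int × String) Int) (hnd : d.keys.Nodup)
    {t : Int × String} (hc : d.contains t = true) (g : Int → Int) :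
    (d.modify t 0 g).values.sum = d.values.sum + (g (d.getD t 0) - d.getD t 0) := by
  have hk := pvKeys_modify hc g
  rw [PySem.Dict.values_eq_map_keys (d.modify t 0 g) (by rw [hk]; exact hnd) 0,
    PySem.Dict.values_eq_map_keys d hnd 0, hk]
  have hdelta := pvSumInt_delta (f := fun k => d.getD k 0)
    (g := fun k => (d.modify t 0 g).getD k 0)
    hnd ((PySem.Dict.contains_iff_mem_keys d t).mp hc)
    (fun u _ hne => by simp [PySem.Dict.getD_modify, hne])
  rw [hdelta]
  have he : (d.modify t 0 g).getD t 0 = g (d.getD t 0) := by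
    rw [PySem.Dict.getD_modify, if_pos rfl]
  simp only [he]

lemma pvGoA_false : ∀ (f : Nat) (d : PySem.Dict (Int × String) Int), d.keys.Nodup →
    d.values.sum % 3 ≠ 0 → pvGoA f d = false := by
  intro f
  induction f with
  | zero => intro d _ _; rw [pvGoA]
  | succ f IH =>
    intro d hnd hs
    rw [pvGoA, if_neg (by omega : ¬ d.values.sum = 0)]
    have hbody : ∀ t, pvBodyA f d t = false := by
      intro t
      unfold pvBodyA
      by_cases h0 : d.getD t 0 = 0
      · rw [if_pos h0]
      rw [if_neg h0]
      have htrip : (if 3 ≤ d.getD t 0 then pvGoA f (d.modify t 0 (fun x => x - 3))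
          else false) = false := by
        split_ifs with h3
        · refine IH _ ?_ ?_
          · rw [pvKeys_trip h0]; exact hnd
          · rw [pvSum_modify d hnd (pvContains_of_getD_ne h0)]
            omega
        · rfl
      have hseq : (if t.2 ∈ pvSuits then
          (if 0 < d.getD (t.1 + 1, t.2) 0 ∧ 0 < d.getD (t.1 + 2, t.2) 0 then
            pvGoA f (((d.modify t 0 (fun x => x - 1)).modify (t.1 + 1, t.2) 0
              (fun x => x - 1)).modify (t.1 + 2, t.2) 0 (fun x => x - 1))
          else false) else false) = false := by
        split_ifs with hsuit hp
        · obtain ⟨v, s⟩ := t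
          obtain ⟨hp1, hp2⟩ := hp
          have hp1' : 0 < d.getD (v + 1, s) 0 := hp1
          have hp2' : 0 < d.getD (v + 2, s) 0 := hp2
          refine IH _ ?_ ?_
          · rw [pvKeys_seq h0 hp1' hp2']; exact hnd
          · have hc1 : (d.modify (v, s) 0 (fun x => x - 1)).contains (v + 1, s) = true := by
              apply pvContains_of_getD_ne
              rw [PySem.Dict.getD_modify, if_neg (pvNe01 v s).symm]
              omega
            have hnd1 : (d.modify (v, s) 0 (fun x => x - 1)).keys.Nodup := by
              rw [pvKeys_modify (pvContains_of_getD_ne h0)]; exact hnd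
            have hc2 : ((d.modify (v, s) 0 (fun x => x - 1)).modify (v + 1, s) 0
                (fun x => x - 1)).contains (v + 2, s) = true := by
              apply pvContains_of_getD_ne
              rw [PySem.Dict.getD_modify, if_neg (pvNe12 v s).symm,
                PySem.Dict.getD_modify, if_neg (pvNe02 v s).symm]
              omega
            have hnd2 : ((d.modify (v, s) 0 (fun x => x - 1)).modify (v + 1, s) 0
                (fun x => x - 1)).keys.Nodup := by
              rw [pvKeys_modify hc1]; exact hnd1
            rw [pvSum_modify _ hnd2 hc2, pvSum_modify _ hnd1 hc1,
              pvSum_modify d hnd (pvContains_of_getD_ne h0)]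
            omega
        · rfl
        · rfl
      rw [htrip, hseq]
      rfl
    have hloop : ∀ ks, pvLoopA f d ks = false := by
      intro ks
      induction ks with
      | nil => rw [pvLoopA]
      | cons x ks ihl => rw [pvLoopA, hbody x, ihl]; rfl
    exact hloop _

lemma pvAltLoop_mod3 : ∀ (ks : List (Int × String)) (c : PySem.Dict (Int × String) Int),
    ks.Pairwise (fun a b => pvKey a < pvKey b) →
    (∀ t ∈ ks, t.2 ∈ pvSuits →
      (0 < c.getD (t.1 + 1, t.2) 0 → (t.1 + 1, t.2) ∈ ks) ∧
      (0 < c.getD (t.1 + 2, t.2) 0 → (t.1 + 2, t.2) ∈ ks)) →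
    pvAltLoop c ks = true → (ks.map (fun u => c.getD u 0)).sum % 3 = 0 := by
  intro ks
  induction ks with
  | nil => intro c _ _ _; simp
  | cons t rest IH =>
    intro c hpw hcl htrue
    obtain ⟨v, s⟩ := t
    have hhead : ∀ x ∈ rest, pvKey (v, s) < pvKey x := (List.pairwise_cons.mp hpw).1
    have hpwr : rest.Pairwise (fun a b => pvKey a < pvKey b) := (List.pairwise_cons.mp hpw).2
    have hndr : rest.Nodup := hpwr.imp (fun {a b} hlt he => absurd (he ▸ hlt) (lt_irrefl _))
    have hclr := pvClosure_tail hhead hcl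
    have hmod3 : PySem.Int.mod (c.getD (v, s) 0) 3 = c.getD (v, s) 0 % 3 :=
      PySem.Int.mod_eq_emod_of_pos (by omega)
    simp only [List.map_cons, List.sum_cons]
    by_cases h0 : c.getD (v, s) 0 = 0
    · have hstep : pvAltLoop c ((v, s) :: rest) = pvAltLoop c rest := by
        simp only [pvAltLoop]; rw [if_pos h0]
      rw [hstep] at htrue
      have := IH c hpwr hclr htrue
      omega
    · by_cases hsuit : s ∈ pvSuits
      · by_cases hmz : PySem.Int.mod (c.getD (v, s) 0) 3 = 0
        · have hstep : pvAltLoop c ((v, s) :: rest) = pvAltLoop c rest := by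
            simp only [pvAltLoop]
            rw [if_neg h0, if_pos hsuit, if_neg (by simpa using hmz)]
          rw [hstep] at htrue
          have := IH c hpwr hclr htrue
          omega
        · by_cases hguard : c.getD (v + 1, s) 0 < PySem.Int.mod (c.getD (v, s) 0) 3 ∨
              c.getD (v + 2, s) 0 < PySem.Int.mod (c.getD (v, s) 0) 3
          · exfalso
            have hstep : pvAltLoop c ((v, s) :: rest) = false := by
              simp only [pvAltLoop]
              rw [if_neg h0, if_pos hsuit, if_pos (by simpa using hmz), if_pos hguard]
            rw [hstep] at htrue; cases htrue
          · push_neg at hguard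
            obtain ⟨hg1, hg2⟩ := hguard
            have hstep : pvAltLoop c ((v, s) :: rest)
                = pvAltLoop ((c.modify (v + 1, s) 0
                    (fun x => x - PySem.Int.mod (c.getD (v, s) 0) 3)).modify (v + 2, s) 0
                    (fun x => x - PySem.Int.mod (c.getD (v, s) 0) 3)) rest := by
              simp only [pvAltLoop]
              rw [if_neg h0, if_pos hsuit, if_pos (by simpa using hmz),
                if_neg (by push_neg; exact ⟨hg1, hg2⟩)]
            rw [hstep] at htrue
            have hmem1 : ((v + 1, s) : Int × String) ∈ rest := by
              have mc : 0 < c.getD (v + 1, s) 0 →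
                  ((v + 1, s) : Int × String) ∈ (v, s) :: rest :=
                (hcl (v, s) List.mem_cons_self hsuit).1
              rcases List.mem_cons.mp (mc (by omega)) with he | hr
              · exact absurd (congrArg Prod.fst he) (by simp)
              · exact hr
            have hmem2 : ((v + 2, s) : Int × String) ∈ rest := by
              have mc : 0 < c.getD (v + 2, s) 0 →
                  ((v + 2, s) : Int × String) ∈ (v, s) :: rest :=
                (hcl (v, s) List.mem_cons_self hsuit).2
              rcases List.mem_cons.mp (mc (by omega)) with he | hr
              · exact absurd (congrArg Prod.fst he) (by simp)
              · exact hr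
            have hclr' : ∀ t ∈ rest, t.2 ∈ pvSuits →
                (0 < ((c.modify (v + 1, s) 0
                  (fun x => x - PySem.Int.mod (c.getD (v, s) 0) 3)).modify (v + 2, s) 0
                  (fun x => x - PySem.Int.mod (c.getD (v, s) 0) 3)).getD (t.1 + 1, t.2) 0 →
                  (t.1 + 1, t.2) ∈ rest) ∧
                (0 < ((c.modify (v + 1, s) 0
                  (fun x => x - PySem.Int.mod (c.getD (v, s) 0) 3)).modify (v + 2, s) 0
                  (fun x => x - PySem.Int.mod (c.getD (v, s) 0) 3)).getD (t.1 + 2, t.2) 0 →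
                  (t.1 + 2, t.2) ∈ rest) := by
              intro t' ht' hs'
              obtain ⟨m1, m2⟩ := hclr t' ht' hs'
              constructor
              · intro hp; apply m1; rw [pvBGetD] at hp; revert hp; split_ifs with hx hy
                · rw [hx]; omega
                · rw [hy]; omega
                · exact id
              · intro hp; apply m2; rw [pvBGetD] at hp; revert hp; split_ifs with hx hy
                · rw [hx]; omega
                · rw [hy]; omega
                · exact id
            have hrec := IH _ hpwr hclr' htrue
            -- rewrite the modified sum over the tail
            have hs1 : (rest.map (fun u => (c.modify (v + 1, s) 0
                (fun x => x - PySem.Int.mod (c.getD (v, s) 0) 3)).getD u 0)).sum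
                = (rest.map (fun u => c.getD u 0)).sum
                  - PySem.Int.mod (c.getD (v, s) 0) 3 := by
              have hdelta := pvSumInt_delta (f := fun u => c.getD u 0)
                (g := fun u => (c.modify (v + 1, s) 0
                  (fun x => x - PySem.Int.mod (c.getD (v, s) 0) 3)).getD u 0)
                hndr hmem1
                (fun u _ hne => by simp [PySem.Dict.getD_modify, hne])
              rw [hdelta]
              have he : (c.modify (v + 1, s) 0
                  (fun x => x - PySem.Int.mod (c.getD (v, s) 0) 3)).getD (v + 1, s) 0
                  = c.getD (v + 1, s) 0 - PySem.Int.mod (c.getD (v, s) 0) 3 := by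
                rw [PySem.Dict.getD_modify, if_pos rfl]
              simp only [he]
              ring
            have hs2 : (rest.map (fun u => ((c.modify (v + 1, s) 0
                (fun x => x - PySem.Int.mod (c.getD (v, s) 0) 3)).modify (v + 2, s) 0
                (fun x => x - PySem.Int.mod (c.getD (v, s) 0) 3)).getD u 0)).sum
                = (rest.map (fun u => (c.modify (v + 1, s) 0
                    (fun x => x - PySem.Int.mod (c.getD (v, s) 0) 3)).getD u 0)).sum
                  - PySem.Int.mod (c.getD (v, s) 0) 3 := by
              have hdelta := pvSumInt_delta
                (f := fun u => (c.modify (v + 1, s) 0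
                  (fun x => x - PySem.Int.mod (c.getD (v, s) 0) 3)).getD u 0)
                (g := fun u => ((c.modify (v + 1, s) 0
                  (fun x => x - PySem.Int.mod (c.getD (v, s) 0) 3)).modify (v + 2, s) 0
                  (fun x => x - PySem.Int.mod (c.getD (v, s) 0) 3)).getD u 0)
                hndr hmem2
                (fun u _ hne => by simp [PySem.Dict.getD_modify, hne])
              rw [hdelta]
              have he : ((c.modify (v + 1, s) 0
                  (fun x => x - PySem.Int.mod (c.getD (v, s) 0) 3)).modify (v + 2, s) 0
                  (fun x => x - PySem.Int.mod (c.getD (v, s) 0) 3)).getD (v + 2, s) 0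
                  = (c.modify (v + 1, s) 0
                      (fun x => x - PySem.Int.mod (c.getD (v, s) 0) 3)).getD (v + 2, s) 0
                    - PySem.Int.mod (c.getD (v, s) 0) 3 := by
                rw [PySem.Dict.getD_modify, if_pos rfl]
              simp only [he]
              ring
            rw [hs2, hs1] at hrec
            omega
      · by_cases hmz : PySem.Int.mod (c.getD (v, s) 0) 3 = 0
        · have hstep : pvAltLoop c ((v, s) :: rest) = pvAltLoop c rest := by
            simp only [pvAltLoop]
            rw [if_neg h0, if_neg hsuit, if_neg (by simpa using hmz)]
          rw [hstep] at htrue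
          have := IH c hpwr hclr htrue
          omega
        · exfalso
          have hstep : pvAltLoop c ((v, s) :: rest) = false := by
            simp only [pvAltLoop]
            rw [if_neg h0, if_neg hsuit, if_pos (by simpa using hmz)]
          rw [hstep] at htrue; cases htrue

lemma pvFilterSum (l : List ((Int × String) × Int)) :
    ((l.filter (fun p => !(p.2 == 0))).map (fun p => p.2)).sum
      = (l.map (fun p => p.2)).sum := by
  induction l with
  | nil => rfl
  | cons p l ih =>
    by_cases h : p.2 = 0 <;> simp [List.filter_cons, h, ih] <;> omega

-- ===== VERDICT (by name: the statement is the Claim_ definition above) =====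
theorem remove_sets_spec : Claim_equal_remove_sets := by
  intro counts _ hpre
  unfold Spec_remove_sets
  have hnd0 : (PySem.Dict.ofList (counts.map (fun x => ((x.1, x.2.1), x.2.2)))).keys.Nodup :=
    PySem.Dict.nodup_keys_ofList _
  have hcnd := pvFilter_nodup (PySem.Dict.ofList (counts.map (fun x => ((x.1, x.2.1), x.2.2))))
  have hmemS : ∀ u, 0 < (PySem.Dict.ofList
      ((PySem.Dict.ofList (counts.map (fun x => ((x.1, x.2.1), x.2.2)))).items.filter
        (fun p => !(p.2 == 0)))).getD u 0 →
      u ∈ PySem.List.sorted2 (PySem.Dict.ofList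
        ((PySem.Dict.ofList (counts.map (fun x => ((x.1, x.2.1), x.2.2)))).items.filter
          (fun p => !(p.2 == 0)))).keys (fun t => t.1) (fun t => t.2) false := by
    intro u hu
    exact ((pvSorted_perm _).mem_iff).mpr
      ((PySem.Dict.contains_iff_mem_keys _ u).mp (pvContains_of_getD_ne (by omega)))
  have hcv : (PySem.Dict.ofList
      ((PySem.Dict.ofList (counts.map (fun x => ((x.1, x.2.1), x.2.2)))).items.filter
        (fun p => !(p.2 == 0)))).values.sum
      = (PySem.Dict.ofList (counts.map (fun x => ((x.1, x.2.1), x.2.2)))).values.sum := by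
    show ((PySem.Dict.ofList
      ((PySem.Dict.ofList (counts.map (fun x => ((x.1, x.2.1), x.2.2)))).items.filter
        (fun p => !(p.2 == 0)))).items.map (fun x => x.2)).sum = _
    rw [pvFilter_items _ hnd0, pvFilterSum]
    rfl
  rcases hpre with hpre | hsum
  · -- natural domain: both compute decomposability
    have hn0 := pvD0_nonneg counts hpre
    have hA : (remove_sets counts = true) ↔
        pvDecomp (pvFd (PySem.Dict.ofList (counts.map (fun x => ((x.1, x.2.1), x.2.2))))) := by
      simp only [remove_sets]
      constructor
      · exact pvGoA_sound _ _ hnd0 hn0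
      · intro h
        exact pvGoA_complete _ h _ _ hnd0 hn0 rfl (by omega)
    have hcg := pvFilter_getD (PySem.Dict.ofList (counts.map (fun x => ((x.1, x.2.1), x.2.2)))) hnd0
    have hck := pvFilter_keys (PySem.Dict.ofList (counts.map (fun x => ((x.1, x.2.1), x.2.2)))) hnd0
    have hnc : ∀ u, 0 ≤ (PySem.Dict.ofList
        ((PySem.Dict.ofList (counts.map (fun x => ((x.1, x.2.1), x.2.2)))).items.filter
          (fun p => !(p.2 == 0)))).getD u 0 := by
      intro u; rw [hcg u]; exact hn0 u
    have hB : (remove_sets_alt counts = true) ↔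
        pvDecomp (pvFd (PySem.Dict.ofList (counts.map (fun x => ((x.1, x.2.1), x.2.2))))) := by
      simp only [remove_sets_alt]
      rw [pvAltLoop_iff _ _ hnc (pvSorted_strict _ hcnd)
        (fun t _ _ => ⟨fun hp => hmemS _ hp, fun hp => hmemS _ hp⟩)]
      have hFReq : pvFR (PySem.Dict.ofList
          ((PySem.Dict.ofList (counts.map (fun x => ((x.1, x.2.1), x.2.2)))).items.filter
            (fun p => !(p.2 == 0))))
          (PySem.List.sorted2 (PySem.Dict.ofList
            ((PySem.Dict.ofList (counts.map (fun x => ((x.1, x.2.1), x.2.2)))).items.filter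
              (fun p => !(p.2 == 0)))).keys (fun t => t.1) (fun t => t.2) false)
          = pvFd (PySem.Dict.ofList (counts.map (fun x => ((x.1, x.2.1), x.2.2)))) := by
        funext u
        by_cases hu : u ∈ PySem.List.sorted2 (PySem.Dict.ofList
            ((PySem.Dict.ofList (counts.map (fun x => ((x.1, x.2.1), x.2.2)))).items.filter
              (fun p => !(p.2 == 0)))).keys (fun t => t.1) (fun t => t.2) false
        · simp only [pvFR, if_pos hu, pvFd, hcg u]
        · have hz : (PySem.Dict.ofList (counts.map (fun x => ((x.1, x.2.1), x.2.2)))).getD u 0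
              = 0 := by
            by_contra hzz
            exact hu (((pvSorted_perm _).mem_iff).mpr ((hck u).mpr hzz))
          simp [pvFR, if_neg hu, pvFd, hz]
      rw [hFReq]
    exact Bool.coe_iff_coe.mp (hA.trans hB.symm)
  · -- total not divisible by three: both reject
    have hA : remove_sets counts = false := by
      simp only [remove_sets]
      exact pvGoA_false _ _ hnd0 hsum
    have hB : remove_sets_alt counts = false := by
      simp only [remove_sets_alt]
      cases hb : pvAltLoop (PySem.Dict.ofList
          ((PySem.Dict.ofList (counts.map (fun x => ((x.1, x.2.1), x.2.2)))).items.filter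
            (fun p => !(p.2 == 0))))
          (PySem.List.sorted2 (PySem.Dict.ofList
            ((PySem.Dict.ofList (counts.map (fun x => ((x.1, x.2.1), x.2.2)))).items.filter
              (fun p => !(p.2 == 0)))).keys (fun t => t.1) (fun t => t.2) false) with
      | false => rfl
      | true =>
        exfalso
        have hm3 := pvAltLoop_mod3 _ _ (pvSorted_strict _ hcnd)
          (fun t _ _ => ⟨fun hp => hmemS _ hp, fun hp => hmemS _ hp⟩) hb
        have hperm : ((PySem.List.sorted2 (PySem.Dict.ofList
            ((PySem.Dict.ofList (counts.map (fun x => ((x.1, x.2.1), x.2.2)))).items.filter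
              (fun p => !(p.2 == 0)))).keys (fun t => t.1) (fun t => t.2) false).map
            (fun u => (PySem.Dict.ofList
              ((PySem.Dict.ofList (counts.map (fun x => ((x.1, x.2.1), x.2.2)))).items.filter
                (fun p => !(p.2 == 0)))).getD u 0)).sum
            = (PySem.Dict.ofList
              ((PySem.Dict.ofList (counts.map (fun x => ((x.1, x.2.1), x.2.2)))).items.filter
                (fun p => !(p.2 == 0)))).values.sum := by
          rw [((pvSorted_perm _).map _).sum_eq,
            PySem.Dict.values_eq_map_keys _ hcnd 0]
        rw [hperm, hcv] at hm3
        exact hsum hm3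
    rw [hA, hB]
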